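-- pv_equiv track=rewrite | github.com/dimikout3/cellularAutomata | cellurarAutomata/task1/task2.py | rule_dictionary
-- ===== SOURCE A (Python) =====
-- import itertools
--
-- def rule_dictionary(rule, distinct):
--
--     # distinctList = ['0', '1', '2', ... 'distinct-1']
--     distinctList = [str(i) for i in range(distinct)]
--
--     # perm = [('0,'0','0'), ('0','0','1'), ... ('2', '2', '2')]
--     perm = [i for i in itertools.product(distinctList, repeat=(2*radius+1))]
--
--     # keys = ['000', '001', ... '222']
--     keys = [''.join(i) for i in perm]
--
--     pattern_dic = {}
--
--     for indx, val in enumerate(keys):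
--         pattern_dic[val] = rule[indx]
--
--     return pattern_dic
--
-- radius = 1
-- ===== SOURCE B (Python) =====
-- radius = 1
--
-- def rule_dictionary(rule, distinct):
--     # builds each key directly from its index (base-`distinct` positional digits,
--     # width 2*radius+1 == 3) instead of materialising itertools.product
--     pattern_dic = {}
--     if distinct <= 0:
--         return pattern_dic
--     for indx in range(distinct ** 3):
--         key = (str(indx // (distinct * distinct) % distinct)
--                + str(indx // distinct % distinct)
--                + str(indx % distinct))
--         pattern_dic[key] = rule[indx]
--     return pattern_dic
-- ===== Notes on version B (the rewrite author's own statement) =====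
-- stated objective: alternative
-- what changed: B drops itertools.product and the materialised key list: it loops once over the index range 0..distinct**3 and builds each key directly as the index's three base-`distinct` digit strings (positional // and % extraction), reproducing product's counting order.
import Mathlib
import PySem

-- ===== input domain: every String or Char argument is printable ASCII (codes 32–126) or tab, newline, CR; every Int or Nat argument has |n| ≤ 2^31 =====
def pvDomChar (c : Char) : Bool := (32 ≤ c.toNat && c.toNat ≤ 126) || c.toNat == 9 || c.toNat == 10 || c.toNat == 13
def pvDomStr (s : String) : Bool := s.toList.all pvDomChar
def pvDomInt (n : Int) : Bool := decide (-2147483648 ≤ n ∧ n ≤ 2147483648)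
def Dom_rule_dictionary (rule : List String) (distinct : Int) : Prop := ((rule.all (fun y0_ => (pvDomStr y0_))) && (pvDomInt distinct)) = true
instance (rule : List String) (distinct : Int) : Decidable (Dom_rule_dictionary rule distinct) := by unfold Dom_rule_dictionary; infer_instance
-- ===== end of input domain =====

-- B builds each key directly from its index (base-`distinct` digits, width 2*radius+1 = 3)
-- instead of materialising the itertools.product list; objective: alternative decomposition.

-- ===== PORT A =====
-- radius = 1 is a module constant, so repeat = 2*radius+1 = 3; itertools.product(l, repeat=3)
-- is ported as the literal three nested loops it performs.
def rule_dictionary (rule : List String) (distinct : Int) : List (String × String) :=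
  let distinctList := (PySem.List.pyRange 0 distinct).map PySem.Int.toStr
  let perm := distinctList.flatMap fun a =>
    distinctList.flatMap fun b => distinctList.map fun c => (a, b, c)
  let keys := perm.map fun t => PySem.Str.join "" [t.1, t.2.1, t.2.2]
  let st := (PySem.List.enumerate keys).foldl
    (fun (st : Option (PySem.Dict String String)) p =>
      match st, PySem.List.pyGet? rule p.1 with
      | some dic, some v => some (dic.insert p.2 v)
      | _, _ => none)                       -- none = rule[indx] raised IndexError (outside Pre_)
    (some PySem.Dict.empty)
  (st.map PySem.Dict.items).getD []

-- ===== PORT B =====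
def rule_dictionary_alt (rule : List String) (distinct : Int) : List (String × String) :=
  if distinct ≤ 0 then [] else
  let st := (PySem.List.pyRange 0 (distinct ^ 3)).foldl
    (fun (st : Option (PySem.Dict String String)) indx =>
      st.bind fun dic =>
        (PySem.List.pyGet? rule indx).map fun v =>
          dic.insert (PySem.Str.join "" [
              PySem.Int.toStr (PySem.Int.mod (PySem.Int.floordiv indx (distinct * distinct)) distinct),
              PySem.Int.toStr (PySem.Int.mod (PySem.Int.floordiv indx distinct) distinct),
              PySem.Int.toStr (PySem.Int.mod indx distinct)] ) v)
                                            -- none = rule[indx] raised IndexError (outside Pre_)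
    (some PySem.Dict.empty)
  (st.map PySem.Dict.items).getD []

-- ===== PRECONDITION & SPEC =====
-- A raises IndexError (rule[indx]) iff distinct ≥ 1 and rule has fewer than distinct^3 entries.
def Pre_rule_dictionary (rule : List String) (distinct : Int) : Prop :=
  distinct ≤ 0 ∨ distinct ^ 3 ≤ (rule.length : Int)
instance (rule : List String) (distinct : Int) : Decidable (Pre_rule_dictionary rule distinct) := by
  unfold Pre_rule_dictionary; infer_instance
def pvWitness_rule_dictionary : List String × Int :=
  (["a", "b", "c", "d", "e", "f", "g", "h"], 2)

def Spec_rule_dictionary (rule : List String) (distinct : Int) (out : List (String × String)) : Prop := out = rule_dictionary_alt rule distinct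
instance (rule : List String) (distinct : Int) (out : List (String × String)) : Decidable (Spec_rule_dictionary rule distinct out) := by unfold Spec_rule_dictionary; infer_instance

-- ===== CLAIM (what is proved, stated in full; the proofs are below) =====
def Claim_equal_rule_dictionary : Prop := ∀ (rule : List String) (distinct : Int), Dom_rule_dictionary rule distinct → Pre_rule_dictionary rule distinct → Spec_rule_dictionary rule distinct (rule_dictionary rule distinct)

-- ===== LEMMAS AND PROOFS =====

-- two nested index loops flattened into one loop over m*k indices
theorem pvProd2 {α : Type} (m k : Nat) (G : Nat → Nat → α) :
    (List.range m).flatMap (fun a => (List.range k).map (fun b => G a b))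
      = (List.range (m * k)).map (fun i => G (i / k) (i % k)) := by
  induction m with
  | zero => simp
  | succ m ih =>
    rw [List.range_succ, List.flatMap_append, ih, Nat.succ_mul, List.range_add,
      List.map_append, List.map_map]
    refine congrArg₂ (· ++ ·) rfl ?_
    simp only [List.flatMap_singleton]
    refine List.map_congr_left (fun x hx => ?_)
    have hxk : x < k := List.mem_range.mp hx
    have h1 : (m * k + x) / k = m := by
      rw [Nat.add_comm, Nat.add_mul_div_right _ _ (Nat.zero_lt_of_lt hxk),
        Nat.div_eq_of_lt hxk, Nat.zero_add]
    have h2 : (m * k + x) % k = x := by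
      rw [Nat.add_comm, Nat.add_mul_mod_self_right, Nat.mod_eq_of_lt hxk]
    simp [h1, h2]

-- three nested index loops flattened into one loop over n^3 indices, with the digit extraction
theorem pvTriple {α : Type} (n : Nat) (F : Nat → Nat → Nat → α) :
    (List.range n).flatMap (fun a => (List.range n).flatMap (fun b =>
        (List.range n).map (fun c => F a b c)))
      = (List.range (n * n * n)).map (fun i => F (i / (n * n)) (i / n % n) (i % n)) := by
  have inner : ∀ a, (List.range n).flatMap (fun b => (List.range n).map (fun c => F a b c))
      = (List.range (n * n)).map (fun i => F a (i / n) (i % n)) := fun a => pvProd2 n n _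
  calc (List.range n).flatMap (fun a => (List.range n).flatMap (fun b =>
          (List.range n).map (fun c => F a b c)))
      = (List.range n).flatMap (fun a => (List.range (n * n)).map (fun i => F a (i / n) (i % n))) := by
        simp only [inner]
    _ = (List.range (n * (n * n))).map (fun i => F (i / (n * n)) (i % (n * n) / n) (i % (n * n) % n)) :=
        pvProd2 n (n * n) _
    _ = (List.range (n * n * n)).map (fun i => F (i / (n * n)) (i / n % n) (i % n)) := by
        rw [Nat.mul_assoc]
        refine List.map_congr_left (fun i _ => ?_)
        rw [Nat.mod_mul_right_div_self, Nat.mod_mod_of_dvd _ ⟨n, rfl⟩]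

-- A's key list (join over the product triples) IS the list of base-`distinct` digit strings
-- of the indices 0 .. distinct^3 - 1, in order.
theorem pvKeys (n : Nat) :
    (((PySem.List.pyRange 0 (n : Int)).map PySem.Int.toStr).flatMap fun a =>
        ((PySem.List.pyRange 0 (n : Int)).map PySem.Int.toStr).flatMap fun b =>
          ((PySem.List.pyRange 0 (n : Int)).map PySem.Int.toStr).map fun c => (a, b, c)).map
        (fun t => PySem.Str.join "" [t.1, t.2.1, t.2.2])
      = (PySem.List.pyRange 0 ((n : Int) ^ 3)).map (fun i =>
          PySem.Str.join "" [
            PySem.Int.toStr (PySem.Int.mod (PySem.Int.floordiv i ((n : Int) * (n : Int))) (n : Int)),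
            PySem.Int.toStr (PySem.Int.mod (PySem.Int.floordiv i (n : Int)) (n : Int)),
            PySem.Int.toStr (PySem.Int.mod i (n : Int))]) := by
  have hpow : ((n : Int) ^ 3) = ((n * n * n : Nat) : Int) := by push_cast; ring
  rw [hpow, PySem.List.pyRange_one 0 ((n * n * n : Nat) : Int), PySem.List.pyRange_one 0 (n : Int)]
  simp only [Int.sub_zero, Int.toNat_natCast, List.map_flatMap, List.map_map,
    List.flatMap_map, List.map_map, Function.comp_def]
  rw [pvTriple n (fun a b c => PySem.Str.join ""
    [PySem.Int.toStr ((0 : Int) + a), PySem.Int.toStr ((0 : Int) + b), PySem.Int.toStr ((0 : Int) + c)])]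
  refine List.map_congr_left (fun k hk => ?_)
  have hklt : k < n * n * n := List.mem_range.mp hk
  have hd : k / (n * n) % n = k / (n * n) := by
    have : k / (n * n) < n := Nat.div_lt_of_lt_mul (by omega)
    exact Nat.mod_eq_of_lt this
  simp only [← Nat.cast_mul, PySem.Int.floordiv_natCast, PySem.Int.mod_natCast, hd, Int.zero_add]

-- enumerate of a mapped index range is the range of (index, value) pairs
theorem pvEnumMap {α : Type} (N : Nat) (f : Int → α) (d : α) :
    PySem.List.enumerate ((PySem.List.pyRange 0 (N : Int)).map f)
      = (PySem.List.pyRange 0 (N : Int)).map (fun j => (j, f j)) := by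
  rw [PySem.List.enumerate_eq_map_pyRange _ d]
  have hlen : PySem.List.len ((PySem.List.pyRange 0 (N : Int)).map f) = (N : Int) := by
    simp [PySem.List.len, PySem.List.length_pyRange_one]
  rw [hlen]
  refine List.map_congr_left (fun j hj => ?_)
  obtain ⟨h0, hN⟩ := (PySem.List.mem_pyRange_one).mp hj
  obtain ⟨k, rfl⟩ : ∃ k : Nat, j = (k : Int) := ⟨j.toNat, (Int.toNat_of_nonneg h0).symm⟩
  have hk : k < N := by exact_mod_cast hN
  rw [PySem.List.pyGetD_map_pyRange f N k d hk]

theorem rule_dictionary_spec : Claim_equal_rule_dictionary := by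
  intro rule distinct _ _
  unfold Spec_rule_dictionary
  by_cases hle : distinct ≤ 0
  · have h0 : PySem.List.pyRange 0 distinct = [] := PySem.List.pyRange_one_eq_nil hle
    simp [rule_dictionary, rule_dictionary_alt, h0, hle, PySem.Dict.empty]
  · have hlt : (0 : Int) < distinct := lt_of_not_ge hle
    lift distinct to ℕ using hlt.le with n
    simp only [rule_dictionary, rule_dictionary_alt, if_neg hle]
    have hp : ((n : Int)) ^ 3 = ((n ^ 3 : Nat) : Int) := by push_cast; ring
    rw [pvKeys n, hp, pvEnumMap (n ^ 3) _ "", List.foldl_map,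
      PySem.List.foldl_congr_mem _ _ (fun (st : Option (PySem.Dict String String)) (j : Int) =>
        st.bind fun dic => (PySem.List.pyGet? rule j).map fun v =>
          dic.insert (PySem.Str.join "" [
            PySem.Int.toStr (PySem.Int.mod (PySem.Int.floordiv j ((n : Int) * (n : Int))) (n : Int)),
            PySem.Int.toStr (PySem.Int.mod (PySem.Int.floordiv j (n : Int)) (n : Int)),
            PySem.Int.toStr (PySem.Int.mod j (n : Int))]) v) _
        (fun acc x _ => by cases acc <;> cases hv : PySem.List.pyGet? rule x <;> simp [hv])]
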